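-- pv_equiv track=rewrite | github.com/villevaara/data_input_text_reuse | code/tranalysis_bayle.py | get_text_not_in_fragments
-- ===== SOURCE A (Python) =====
-- def get_text_not_in_fragments(fragments_other_author, item_text,
--                               text_type='raw'):
--     is_original = {}
--     for index in range(0, len(item_text)):
--         is_original[index] = True
--     for fragment in fragments_other_author:
--         if text_type == 'raw':
--             for index in range(fragment['text_start_primary'],
--                                fragment['text_end_primary']):
--                 is_original[index] = False
--         elif text_type == 'api':
--             for index in range(fragment['api_text_start_primary'],
--                                fragment['api_text_end_primary']):
--                 is_original[index] = False
--     return is_original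
-- ===== SOURCE B (Python) =====
-- def get_text_not_in_fragments(fragments_other_author, item_text,
--                               text_type='raw'):
--     if text_type == 'raw':
--         start_key, end_key = 'text_start_primary', 'text_end_primary'
--     elif text_type == 'api':
--         start_key, end_key = 'api_text_start_primary', 'api_text_end_primary'
--     else:
--         start_key = end_key = None
--     marks = [True] * len(item_text)
--     if start_key is not None:
--         cur_end = 0
--         intervals = sorted(((f[start_key], f[end_key])
--                             for f in fragments_other_author),
--                            key=lambda t: t[0])
--         for start, end in intervals:
--             for j in range(max(start, cur_end), end):
--                 marks[j] = False
--             cur_end = max(cur_end, end)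
--     return {i: m for i, m in enumerate(marks)}
-- ===== Notes on version B (the rewrite author's own statement) =====
-- stated objective: alternative
-- what changed: Instead of overwriting a dict entry for every index of every fragment range, B sorts the (start,end) intervals once and sweeps them left-to-right with a running covered-end over a boolean array, writing each text index False at most once.
import Mathlib
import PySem

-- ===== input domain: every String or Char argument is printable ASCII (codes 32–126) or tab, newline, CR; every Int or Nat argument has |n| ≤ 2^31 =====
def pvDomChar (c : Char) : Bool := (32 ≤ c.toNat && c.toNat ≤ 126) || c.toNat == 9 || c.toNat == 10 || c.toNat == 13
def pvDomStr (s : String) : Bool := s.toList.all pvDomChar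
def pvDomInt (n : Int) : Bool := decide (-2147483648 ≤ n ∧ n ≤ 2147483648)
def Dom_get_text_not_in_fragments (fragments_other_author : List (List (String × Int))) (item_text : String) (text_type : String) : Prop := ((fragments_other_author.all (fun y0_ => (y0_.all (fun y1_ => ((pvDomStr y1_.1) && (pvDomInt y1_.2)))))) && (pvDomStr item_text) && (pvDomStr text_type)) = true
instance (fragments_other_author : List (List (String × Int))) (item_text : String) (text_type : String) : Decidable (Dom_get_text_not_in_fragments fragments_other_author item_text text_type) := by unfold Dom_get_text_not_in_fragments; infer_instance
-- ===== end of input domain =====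

-- B replaces A's per-index dict overwriting of every fragment range by one sort of the
-- (start,end) intervals and a left-to-right sweep with a running covered-end over a boolean
-- array, writing each text index False at most once (objective: alternative).

-- ===== PORT A =====
def get_text_not_in_fragments (fragments_other_author : List (List (String × Int))) (item_text : String) (text_type : String) : List (Int × Bool) :=
  -- is_original = {}; for index in range(0, len(item_text)): is_original[index] = True
  let init : PySem.Dict Int Bool :=
    (PySem.List.pyRange 0 (PySem.Str.len item_text)).foldl
      (fun d index => d.insert index true) PySem.Dict.empty
  -- for fragment in fragments_other_author: …  (fragment[key] ported as getD; KeyError excluded by Pre_)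
  let final : PySem.Dict Int Bool :=
    fragments_other_author.foldl
      (fun d fragment =>
        if text_type == "raw" then
          (PySem.List.pyRange ((PySem.Dict.mk fragment).getD "text_start_primary" 0)
              ((PySem.Dict.mk fragment).getD "text_end_primary" 0)).foldl
            (fun d index => d.insert index false) d
        else if text_type == "api" then
          (PySem.List.pyRange ((PySem.Dict.mk fragment).getD "api_text_start_primary" 0)
              ((PySem.Dict.mk fragment).getD "api_text_end_primary" 0)).foldl
            (fun d index => d.insert index false) d
        else d)
      init
  final.items

-- ===== PORT B =====
-- keys chosen by text_type (None for any other text_type)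
def pvKeys (text_type : String) : Option (String × String) :=
  if text_type == "raw" then some ("text_start_primary", "text_end_primary")
  else if text_type == "api" then some ("api_text_start_primary", "api_text_end_primary")
  else none

-- the sweep loop of Source B: sorted intervals, running covered end, marks[j] = False once per j
def pvSweep (intervals : List (Int × Int)) (marks : List Bool) : List Bool :=
  ((PySem.List.sorted intervals (fun t => t.1)).foldl
    (fun (st : List Bool × Int) se =>
      ((PySem.List.pyRange (max se.1 st.2) se.2).foldl
        (fun m j => PySem.List.pySetD m j false) st.1,
       max st.2 se.2))
    (marks, 0)).1

def get_text_not_in_fragments_alt (fragments_other_author : List (List (String × Int))) (item_text : String) (text_type : String) : List (Int × Bool) :=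
  let marks : List Bool := List.replicate (PySem.Str.len item_text).toNat true
  let marks' : List Bool :=
    match pvKeys text_type with
    | none => marks
    | some (sk, ek) =>
        pvSweep (fragments_other_author.map
          (fun f => ((PySem.Dict.mk f).getD sk 0, (PySem.Dict.mk f).getD ek 0))) marks
  PySem.List.enumerate marks'

-- ===== PRECONDITION & SPEC =====
-- A fragment is admissible when it carries both selected keys and its (nonempty) interval
-- stays inside [0, len(item_text)).
def pvFragOK (n : Int) (sk ek : String) (f : List (String × Int)) : Prop :=
  (PySem.Dict.mk f).contains sk = true ∧ (PySem.Dict.mk f).contains ek = true ∧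
  ((PySem.Dict.mk f).getD sk 0 < (PySem.Dict.mk f).getD ek 0 →
    0 ≤ (PySem.Dict.mk f).getD sk 0 ∧ (PySem.Dict.mk f).getD ek 0 ≤ n)

-- Pre_ excludes (a) fragments missing the selected start/end key, on which A raises KeyError,
-- and (b) fragments whose nonempty interval leaves [0, len(item_text)), a corner where A pads
-- its dict with spurious non-text indices while B's array sweep raises IndexError past the end
-- and clips negative indices, marking text indices only.
def Pre_get_text_not_in_fragments (fragments_other_author : List (List (String × Int))) (item_text : String) (text_type : String) : Prop :=
  (text_type = "raw" → ∀ f ∈ fragments_other_author,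
      pvFragOK (PySem.Str.len item_text) "text_start_primary" "text_end_primary" f) ∧
  (text_type = "api" → ∀ f ∈ fragments_other_author,
      pvFragOK (PySem.Str.len item_text) "api_text_start_primary" "api_text_end_primary" f)
instance (fragments_other_author : List (List (String × Int))) (item_text : String) (text_type : String) : Decidable (Pre_get_text_not_in_fragments fragments_other_author item_text text_type) := by unfold Pre_get_text_not_in_fragments pvFragOK; infer_instance

def pvWitness_get_text_not_in_fragments : (List (List (String × Int))) × String × String :=
  ([[("text_start_primary", 1), ("text_end_primary", 2)]], "abc", "raw")

def Spec_get_text_not_in_fragments (fragments_other_author : List (List (String × Int))) (item_text : String) (text_type : String) (out : List (Int × Bool)) : Prop := out = get_text_not_in_fragments_alt fragments_other_author item_text text_type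
instance (fragments_other_author : List (List (String × Int))) (item_text : String) (text_type : String) (out : List (Int × Bool)) : Decidable (Spec_get_text_not_in_fragments fragments_other_author item_text text_type out) := by unfold Spec_get_text_not_in_fragments; infer_instance

-- ===== CLAIM (what is proved, stated in full; the proofs are below) =====
def Claim_equal_get_text_not_in_fragments : Prop := ∀ (fragments_other_author : List (List (String × Int))) (item_text : String) (text_type : String), Dom_get_text_not_in_fragments fragments_other_author item_text text_type → Pre_get_text_not_in_fragments fragments_other_author item_text text_type → Spec_get_text_not_in_fragments fragments_other_author item_text text_type (get_text_not_in_fragments fragments_other_author item_text text_type)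

-- ===== LEMMAS AND PROOFS =====

-- "index i is inside some interval of ivs"
def pvCov (ivs : List (Int × Int)) (i : Int) : Bool :=
  ivs.any (fun se => decide (se.1 ≤ i ∧ i < se.2))

-- the canonical result shapes: one entry / one mark per index 0 … N-1
def pvRM (N : Int) (g : Int → Bool) : List (Int × Bool) :=
  (PySem.List.pyRange 0 N).map (fun i => (i, g i))

def pvRB (N : Int) (g : Int → Bool) : List Bool :=
  (PySem.List.pyRange 0 N).map g

lemma pvRM_congr {N : Int} {f f' : Int → Bool}
    (h : ∀ i, 0 ≤ i → i < N → f i = f' i) : pvRM N f = pvRM N f' := by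
  unfold pvRM; apply List.map_congr_left; intro i hi
  rw [PySem.List.mem_pyRange_one] at hi; rw [h i hi.1 hi.2]

lemma pvRB_congr {N : Int} {f f' : Int → Bool}
    (h : ∀ i, 0 ≤ i → i < N → f i = f' i) : pvRB N f = pvRB N f' := by
  unfold pvRB; apply List.map_congr_left; intro i hi
  rw [PySem.List.mem_pyRange_one] at hi; exact h i hi.1 hi.2

lemma pv_replicate (N : Int) (hN : 0 ≤ N) :
    List.replicate N.toNat true = pvRB N (fun i => !pvCov ([] : List (Int × Int)) i) := by
  unfold pvRB
  rw [show (fun i => !pvCov ([] : List (Int × Int)) i) = (Function.const Int true) by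
    funext i; simp [pvCov, Function.const]]
  rw [List.map_const, PySem.List.length_pyRange_one]
  congr 1; omega

-- ----- A side: the dict loops keep the shape pvRM -----

lemma pv_init_items (N : Int) :
    ((PySem.List.pyRange 0 N).foldl (fun d index => d.insert index true)
        (PySem.Dict.empty : PySem.Dict Int Bool)).items
      = pvRM N (fun _ => true) := by
  rw [PySem.Dict.items_foldl_insert_fresh (PySem.List.pyRange 0 N) (fun i => i) (fun _ => true)]
  · simp [pvRM, PySem.Dict.empty]
  · intro a _; simp [PySem.Dict.contains_empty]
  · simpa using PySem.List.nodup_pyRange_one 0 N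

lemma pv_insert_items (N s : Int) (hs0 : 0 ≤ s) (hsN : s < N)
    (g : Int → Bool) (b : Bool) (d : PySem.Dict Int Bool) (hd : d.items = pvRM N g) :
    (d.insert s b).items = pvRM N (fun i => if i = s then b else g i) := by
  have hc : d.contains s = true := by
    rw [PySem.Dict.contains_eq_decide_mem_keys]
    have : s ∈ d.keys := by
      have : d.keys = PySem.List.pyRange 0 N := by
        simp only [PySem.Dict.keys, hd, pvRM, List.map_map]
        exact List.map_id'' (fun x => by simp) _
      rw [this, PySem.List.mem_pyRange_one]
      exact ⟨hs0, hsN⟩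
    simpa using this
  rw [PySem.Dict.items_insert_of_contains d b hc, hd]
  unfold pvRM
  rw [List.map_map]
  apply List.map_congr_left
  intro i hi
  rw [PySem.List.mem_pyRange_one] at hi
  by_cases h : i = s
  · simp [h]
  · simp [h]

lemma pv_mark_items (N : Int) (m : Nat) : ∀ (s e : Int), (e - s).toNat = m →
    ∀ (g : Int → Bool) (d : PySem.Dict Int Bool),
    (s < e → 0 ≤ s ∧ e ≤ N) → d.items = pvRM N g →
    ((PySem.List.pyRange s e).foldl (fun d index => d.insert index false) d).items
      = pvRM N (fun i => if s ≤ i ∧ i < e then false else g i) := by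
  induction m with
  | zero =>
      intro s e hm g d hok hd
      have he : e ≤ s := by omega
      rw [PySem.List.pyRange_one_eq_nil he]
      simp only [List.foldl_nil]
      rw [hd]
      apply pvRM_congr
      intro i _ _
      have : ¬ (s ≤ i ∧ i < e) := by omega
      simp [this]
  | succ m ih =>
      intro s e hm g d hok hd
      have hse : s < e := by omega
      obtain ⟨hs0, heN⟩ := hok hse
      rw [PySem.List.pyRange_one_cons hse]
      simp only [List.foldl_cons]
      rw [ih (s+1) e (by omega) (fun i => if i = s then false else g i)
            (d.insert s false) (by omega)
            (pv_insert_items N s hs0 (by omega) g false d hd)]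
      apply pvRM_congr
      intro i _ _
      by_cases h1 : s + 1 ≤ i ∧ i < e <;> by_cases h2 : s ≤ i ∧ i < e <;>
        by_cases h3 : i = s <;> simp [h1, h2, h3] <;> omega

lemma pv_markAll_items (N : Int) (ivs : List (Int × Int)) :
    ∀ (g : Int → Bool) (d : PySem.Dict Int Bool),
    (∀ se ∈ ivs, se.1 < se.2 → 0 ≤ se.1 ∧ se.2 ≤ N) → d.items = pvRM N g →
    (ivs.foldl (fun d se =>
        (PySem.List.pyRange se.1 se.2).foldl (fun d index => d.insert index false) d) d).items
      = pvRM N (fun i => g i && !pvCov ivs i) := by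
  induction ivs with
  | nil =>
      intro g d _ hd
      simp only [List.foldl_nil]
      rw [hd]; apply pvRM_congr; intro i _ _; simp [pvCov]
  | cons se rest ih =>
      intro g d hok hd
      simp only [List.foldl_cons]
      rw [ih (fun i => if se.1 ≤ i ∧ i < se.2 then false else g i) _
            (fun x hx => hok x (List.mem_cons_of_mem se hx))
            (pv_mark_items N (se.2 - se.1).toNat se.1 se.2 rfl g d
              (hok se (List.mem_cons_self ..)) hd)]
      apply pvRM_congr
      intro i _ _
      by_cases h : se.1 ≤ i ∧ i < se.2
      · simp [pvCov, h]
      · have h' : (decide (se.1 ≤ i) && decide (i < se.2)) = false := by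
          rcases (not_and_or.mp h) with h | h <;> simp [h]
        simp [pvCov, h']

-- ----- B side: the sweep writes exactly the complement of the covered indices -----

lemma pv_setRB (N a : Int) (ha0 : 0 ≤ a) (g : Int → Bool) (b : Bool) :
    (pvRB N g).set a.toNat b = pvRB N (fun i => if i = a then b else g i) := by
  apply List.ext_getElem
  · simp [pvRB]
  · intro k h1 h2
    simp only [pvRB, List.getElem_set, List.getElem_map]
    simp only [pvRB, List.length_map, PySem.List.length_pyRange_one] at h2
    have hk : k < (PySem.List.pyRange 0 N).length := by
      rw [PySem.List.length_pyRange_one]; omega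
    rw [PySem.List.getElem_pyRange_one 0 N k hk]
    by_cases h : a.toNat = k
    · have h2' : ((k:Int) = a) := by omega
      simp [h, h2']
    · have h2' : ¬ ((k:Int) = a) := by omega
      simp [h, h2']

lemma pv_setRange (N : Int) (m : Nat) : ∀ (a e : Int), (e - a).toNat = m →
    ∀ (g : Int → Bool), (a < e → 0 ≤ a ∧ e ≤ N) →
    (PySem.List.pyRange a e).foldl (fun m j => PySem.List.pySetD m j false) (pvRB N g)
      = pvRB N (fun i => if a ≤ i ∧ i < e then false else g i) := by
  induction m with
  | zero =>
      intro a e hm g hok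
      have he : e ≤ a := by omega
      rw [PySem.List.pyRange_one_eq_nil he]
      simp only [List.foldl_nil]
      apply pvRB_congr
      intro i _ _
      have : ¬ (a ≤ i ∧ i < e) := by omega
      simp [this]
  | succ m ih =>
      intro a e hm g hok
      have hae : a < e := by omega
      obtain ⟨ha0, heN⟩ := hok hae
      rw [PySem.List.pyRange_one_cons hae]
      simp only [List.foldl_cons]
      rw [PySem.List.pySetD_of_nonneg _ _ ha0, pv_setRB N a ha0 g false,
        ih (a+1) e (by omega) _ (by omega)]
      apply pvRB_congr
      intro i _ _
      by_cases h1 : a + 1 ≤ i ∧ i < e <;> by_cases h2 : a ≤ i ∧ i < e <;>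
        by_cases h3 : i = a <;> simp [h1, h2, h3] <;> omega

-- the sweep invariant: marks describe the prefix P already processed, cur is an end
-- reached by some interval of P, and sortedness makes the skipped region already covered
lemma pv_sweep_aux (N : Int) (Q : List (Int × Int)) : ∀ (P : List (Int × Int)),
    (P ++ Q).Pairwise (fun x y => x.1 ≤ y.1) →
    (∀ se ∈ P ++ Q, se.1 < se.2 → 0 ≤ se.1 ∧ se.2 ≤ N) →
    ∀ (cur : Int), 0 ≤ cur → (cur = 0 ∨ ∃ se ∈ P, se.2 = cur) →
    (Q.foldl
      (fun (st : List Bool × Int) se =>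
        ((PySem.List.pyRange (max se.1 st.2) se.2).foldl
          (fun m j => PySem.List.pySetD m j false) st.1,
         max st.2 se.2))
      (pvRB N (fun i => !pvCov P i), cur)).1
      = pvRB N (fun i => !pvCov (P ++ Q) i) := by
  induction Q with
  | nil => intro P _ _ cur _ _; simp
  | cons se Q' ih =>
      intro P hsorted hok cur hcur0 hcurcov
      obtain ⟨s, e⟩ := se
      simp only [List.foldl_cons]
      have hokw : max s cur < e → 0 ≤ max s cur ∧ e ≤ N := by
        intro hw
        have hse : s < e := by omega
        have := hok (s, e) (by simp) hse
        constructor <;> [omega; exact this.2]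
      rw [pv_setRange N (e - max s cur).toNat (max s cur) e rfl _ hokw]
      have hP : ∀ x ∈ P, ∀ y ∈ (s, e) :: Q', x.1 ≤ y.1 :=
        (List.pairwise_append.mp hsorted).2.2
      have hstep : (pvRB N (fun i => if max s cur ≤ i ∧ i < e then false else !pvCov P i))
          = pvRB N (fun i => !pvCov (P ++ [(s, e)]) i) := by
        apply pvRB_congr
        intro i hi0 hiN
        have hcovapp : pvCov (P ++ [(s, e)]) i
            = (pvCov P i || decide (s ≤ i ∧ i < e)) := by
          simp [pvCov]
        rw [hcovapp]
        by_cases hcP : pvCov P i = true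
        · by_cases hw : max s cur ≤ i ∧ i < e <;> simp [hw, hcP]
        · have hcP' : pvCov P i = false := by simpa using hcP
          by_cases hin : s ≤ i ∧ i < e
          · -- i lies in the new interval: the window reaches it, because everything
            -- between s and cur is covered by the interval of P ending at cur
            have hcuri : cur ≤ i := by
              by_contra hlt
              rcases hcurcov with h0 | ⟨se0, hse0P, hse0e⟩
              · omega
              · have hs0 : se0.1 ≤ s := (hP se0 hse0P (s, e) (by simp))
                have : pvCov P i = true := by
                  unfold pvCov
                  rw [List.any_eq_true]
                  exact ⟨se0, hse0P, by simp; omega⟩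
                simp [this] at hcP'
            have hw : max s cur ≤ i ∧ i < e := by omega
            simp [hw, hin, hcP']
          · have hw : ¬ (max s cur ≤ i ∧ i < e) := by omega
            simp [hin, hcP']
            omega
      rw [hstep]
      have happ : P ++ (s, e) :: Q' = (P ++ [(s, e)]) ++ Q' := by simp
      rw [happ]
      apply ih (P ++ [(s, e)])
      · rw [← happ]; exact hsorted
      · rw [← happ]; exact hok
      · omega
      · by_cases hec : e ≤ cur
        · have : max cur e = cur := by omega
          rw [this]
          rcases hcurcov with h0 | ⟨se0, hse0P, hse0e⟩
          · exact Or.inl h0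
          · exact Or.inr ⟨se0, List.mem_append_left _ hse0P, hse0e⟩
        · have : max cur e = e := by omega
          rw [this]
          exact Or.inr ⟨(s, e), by simp, rfl⟩

lemma pv_sweep (N : Int) (ivs : List (Int × Int))
    (hok : ∀ se ∈ ivs, se.1 < se.2 → 0 ≤ se.1 ∧ se.2 ≤ N) (hN : 0 ≤ N) :
    pvSweep ivs (List.replicate N.toNat true) = pvRB N (fun i => !pvCov ivs i) := by
  unfold pvSweep
  rw [pv_replicate N hN, pv_sweep_aux N (PySem.List.sorted ivs (fun t => t.1)) []
      (by simpa using PySem.List.sorted_pairwise ivs (fun t => t.1))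
      (by intro se hse
          exact hok se ((PySem.List.mem_sorted ivs (fun t : Int × Int => t.1) false se).mp
            (by simpa using hse)))
      0 le_rfl (Or.inl rfl)]
  simp only [List.nil_append]
  apply pvRB_congr
  intro i _ _
  congr 1
  exact List.Perm.any_eq (PySem.List.sorted_perm ivs (fun t : Int × Int => t.1) false)

lemma pv_enum (N : Int) (hN : 0 ≤ N) (g : Int → Bool) :
    PySem.List.enumerate (pvRB N g) = pvRM N g := by
  rw [PySem.List.enumerate_eq_map_pyRange (pvRB N g) false]
  have hlen : PySem.List.len (pvRB N g) = N := by
    simp [pvRB, PySem.List.len, PySem.List.length_pyRange_one]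
    omega
  rw [hlen]
  apply List.map_congr_left
  intro i hi
  rw [PySem.List.mem_pyRange_one] at hi
  rw [pvRB, PySem.List.pyGetD_map_pyRange_of_nonneg g N i false hi.1 hi.2]

-- one text_type branch ("raw" or "api"), both sides reduced to pvRM N (!pvCov ivs)
lemma pv_case (frags : List (List (String × Int))) (N : Int) (hN : 0 ≤ N) (sk ek : String)
    (hok : ∀ f ∈ frags, pvFragOK N sk ek f) :
    (frags.foldl (fun d fragment =>
        (PySem.List.pyRange ((PySem.Dict.mk fragment).getD sk 0)
            ((PySem.Dict.mk fragment).getD ek 0)).foldl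
          (fun d index => d.insert index false) d)
      ((PySem.List.pyRange 0 N).foldl (fun d index => d.insert index true)
        (PySem.Dict.empty : PySem.Dict Int Bool))).items
    = PySem.List.enumerate
        (pvSweep (frags.map (fun f => ((PySem.Dict.mk f).getD sk 0, (PySem.Dict.mk f).getD ek 0)))
          (List.replicate N.toNat true)) := by
  have hfold : frags.foldl (fun d fragment =>
        (PySem.List.pyRange ((PySem.Dict.mk fragment).getD sk 0)
            ((PySem.Dict.mk fragment).getD ek 0)).foldl
          (fun d index => d.insert index false) d)
      ((PySem.List.pyRange 0 N).foldl (fun d index => d.insert index true)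
        (PySem.Dict.empty : PySem.Dict Int Bool))
      = (frags.map (fun f => ((PySem.Dict.mk f).getD sk 0, (PySem.Dict.mk f).getD ek 0))).foldl
        (fun d se => (PySem.List.pyRange se.1 se.2).foldl (fun d index => d.insert index false) d)
        ((PySem.List.pyRange 0 N).foldl (fun d index => d.insert index true) PySem.Dict.empty) := by
    rw [List.foldl_map]
  have hok' : ∀ se ∈ frags.map
      (fun f => ((PySem.Dict.mk f).getD sk 0, (PySem.Dict.mk f).getD ek 0)),
      se.1 < se.2 → 0 ≤ se.1 ∧ se.2 ≤ N := by
    intro se hse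
    obtain ⟨f, hf, rfl⟩ := List.mem_map.mp hse
    exact (hok f hf).2.2
  rw [hfold,
    pv_markAll_items N _ (fun _ => true) _ hok' (pv_init_items N),
    pv_sweep N _ hok' hN, pv_enum N hN]
  apply pvRM_congr
  intro i _ _
  simp

-- ===== VERDICT (by name: the statement is the Claim_ definition above) =====
theorem get_text_not_in_fragments_spec : Claim_equal_get_text_not_in_fragments := by
  intro frags item_text text_type _dom hpre
  unfold Spec_get_text_not_in_fragments
  unfold get_text_not_in_fragments get_text_not_in_fragments_alt
  have hN : 0 ≤ PySem.Str.len item_text := by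
    rw [PySem.Str.len_eq]; exact Int.natCast_nonneg _
  by_cases hraw : text_type = "raw"
  · subst hraw
    rw [show pvKeys "raw" = some ("text_start_primary", "text_end_primary") from by
      unfold pvKeys; rw [if_pos (by decide)]]
    have hbody : ∀ (d : PySem.Dict Int Bool) (fragment : List (String × Int)),
        (if (("raw" : String) == "raw") = true then
          (PySem.List.pyRange ((PySem.Dict.mk fragment).getD "text_start_primary" 0)
              ((PySem.Dict.mk fragment).getD "text_end_primary" 0)).foldl
            (fun d index => d.insert index false) d
        else if (("raw" : String) == "api") = true then
          (PySem.List.pyRange ((PySem.Dict.mk fragment).getD "api_text_start_primary" 0)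
              ((PySem.Dict.mk fragment).getD "api_text_end_primary" 0)).foldl
            (fun d index => d.insert index false) d
        else d)
        = (PySem.List.pyRange ((PySem.Dict.mk fragment).getD "text_start_primary" 0)
              ((PySem.Dict.mk fragment).getD "text_end_primary" 0)).foldl
            (fun d index => d.insert index false) d := by
      intro d fragment; rw [if_pos (by decide)]
    simp only [hbody]
    exact pv_case frags _ hN _ _ (hpre.1 rfl)
  · by_cases hapi : text_type = "api"
    · subst hapi
      rw [show pvKeys "api" = some ("api_text_start_primary", "api_text_end_primary") from by
        unfold pvKeys; rw [if_neg (by decide), if_pos (by decide)]]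
      have hbody : ∀ (d : PySem.Dict Int Bool) (fragment : List (String × Int)),
          (if (("api" : String) == "raw") = true then
            (PySem.List.pyRange ((PySem.Dict.mk fragment).getD "text_start_primary" 0)
                ((PySem.Dict.mk fragment).getD "text_end_primary" 0)).foldl
              (fun d index => d.insert index false) d
          else if (("api" : String) == "api") = true then
            (PySem.List.pyRange ((PySem.Dict.mk fragment).getD "api_text_start_primary" 0)
                ((PySem.Dict.mk fragment).getD "api_text_end_primary" 0)).foldl
              (fun d index => d.insert index false) d
          else d)
          = (PySem.List.pyRange ((PySem.Dict.mk fragment).getD "api_text_start_primary" 0)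
                ((PySem.Dict.mk fragment).getD "api_text_end_primary" 0)).foldl
              (fun d index => d.insert index false) d := by
        intro d fragment; rw [if_neg (by decide), if_pos (by decide)]
      simp only [hbody]
      exact pv_case frags _ hN _ _ (hpre.2 rfl)
    · rw [show pvKeys text_type = none from by
        unfold pvKeys; rw [if_neg (by simp [hraw]), if_neg (by simp [hapi])]]
      have hbody : ∀ (d : PySem.Dict Int Bool) (fragment : List (String × Int)),
          (if (text_type == "raw") = true then
            (PySem.List.pyRange ((PySem.Dict.mk fragment).getD "text_start_primary" 0)
                ((PySem.Dict.mk fragment).getD "text_end_primary" 0)).foldl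
              (fun d index => d.insert index false) d
          else if (text_type == "api") = true then
            (PySem.List.pyRange ((PySem.Dict.mk fragment).getD "api_text_start_primary" 0)
                ((PySem.Dict.mk fragment).getD "api_text_end_primary" 0)).foldl
              (fun d index => d.insert index false) d
          else d) = d := by
        intro d fragment; rw [if_neg (by simp [hraw]), if_neg (by simp [hapi])]
      simp only [hbody, PySem.List.foldl_ignore]
      rw [pv_init_items (PySem.Str.len item_text), pv_replicate _ hN, pv_enum _ hN]
      apply pvRM_congr
      intro i _ _
      simp [pvCov]
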